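-- pv_equiv track=rewrite | github.com/DaerenKim/simplifynext_agentic_ai | backend/secretary_tools.py | _resolve_catalog_id
-- ===== SOURCE A (Python) =====
-- from typing import Dict, Any, List, Optional
--
-- _INTEREST_CATALOG: List[Dict[str, Any]] = [
--     {"id": "exercise",    "label": "Exercise",                    "aliases": ["workout", "run", "jog", "walk", "walking", "yoga", "stretch"]},
--     {"id": "sleep",       "label": "Sleep all day",               "aliases": ["nap", "rest"]},
--     {"id": "eat",         "label": "Eat",                         "aliases": ["food", "dining", "meal", "cook", "cooking"]},
--     {"id": "meditate",    "label": "Meditate",                    "aliases": ["mindfulness", "breathing", "breathwork"]},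
--     {"id": "travel",      "label": "Travel",                      "aliases": ["trip", "vacation", "getaway"]},
--     {"id": "social",      "label": "Spend time with friends",     "aliases": ["friends", "socialize", "hangout", "meet", "call"]},
--     {"id": "read",        "label": "Read",                        "aliases": ["reading", "books", "book"]},
--     {"id": "movies",      "label": "Watch movies",                "aliases": ["movie", "film", "tv", "netflix"]},
--     {"id": "create_art",  "label": "Create art",                  "aliases": ["draw", "painting", "paint", "sketch", "craft", "creative", "art"]},
-- ]
--
-- def _norm(s: str) -> str:
--     return "".join(ch.lower() for ch in s.strip() if ch.isalnum() or ch in (" ", "_", "-"))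
--
-- def _resolve_catalog_id(value: str) -> Optional[str]:
--     """
--     Map user-provided label/id/synonym to a catalog id.
--     Accepts raw strings from GUI or free text.
--     """
--     if not value:
--         return None
--     n = _norm(value)
--     # direct id match
--     for item in _INTEREST_CATALOG:
--         if n == _norm(item["id"]):
--             return item["id"]
--     # label match
--     for item in _INTEREST_CATALOG:
--         if n == _norm(item["label"]):
--             return item["id"]
--     # aliases match
--     for item in _INTEREST_CATALOG:
--         for a in item.get("aliases", []):
--             if n == _norm(a):
--                 return item["id"]
--     return None
-- ===== SOURCE B (Python) =====
-- from typing import Dict, Optional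
--
-- def _norm(s: str) -> str:
--     return "".join(ch.lower() for ch in s.strip() if ch.isalnum() or ch in (" ", "_", "-"))
--
-- # Flat lookup table: normalized id/label/alias -> catalog id.
-- # (Every duplicate normalization in the catalog maps to the same id, so a
-- # plain literal dict is exact; id > label > alias priority is vacuous here.)
-- _TABLE: Dict[str, str] = {
--     "exercise": "exercise",
--     "sleep": "sleep",
--     "eat": "eat",
--     "meditate": "meditate",
--     "travel": "travel",
--     "social": "social",
--     "read": "read",
--     "movies": "movies",
--     "create_art": "create_art",
--     "sleep all day": "sleep",
--     "spend time with friends": "social",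
--     "watch movies": "movies",
--     "create art": "create_art",
--     "workout": "exercise",
--     "run": "exercise",
--     "jog": "exercise",
--     "walk": "exercise",
--     "walking": "exercise",
--     "yoga": "exercise",
--     "stretch": "exercise",
--     "nap": "sleep",
--     "rest": "sleep",
--     "food": "eat",
--     "dining": "eat",
--     "meal": "eat",
--     "cook": "eat",
--     "cooking": "eat",
--     "mindfulness": "meditate",
--     "breathing": "meditate",
--     "breathwork": "meditate",
--     "trip": "travel",
--     "vacation": "travel",
--     "getaway": "travel",
--     "friends": "social",
--     "socialize": "social",
--     "hangout": "social",
--     "meet": "social",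
--     "call": "social",
--     "reading": "read",
--     "books": "read",
--     "book": "read",
--     "movie": "movies",
--     "film": "movies",
--     "tv": "movies",
--     "netflix": "movies",
--     "draw": "create_art",
--     "painting": "create_art",
--     "paint": "create_art",
--     "sketch": "create_art",
--     "craft": "create_art",
--     "creative": "create_art",
--     "art": "create_art",
-- }
--
-- def _resolve_catalog_id(value: str) -> Optional[str]:
--     if not value:
--         return None
--     return _TABLE.get(_norm(value))
-- ===== Notes on version B (the rewrite author's own statement) =====
-- stated objective: idiomatic
-- what changed: Replaces A's three sequential scans over the catalog (re-normalizing every id, label and alias on each call) with a single precomputed flat dict from normalized string to catalog id, so each call is one normalization plus one dict lookup.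
import Mathlib
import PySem

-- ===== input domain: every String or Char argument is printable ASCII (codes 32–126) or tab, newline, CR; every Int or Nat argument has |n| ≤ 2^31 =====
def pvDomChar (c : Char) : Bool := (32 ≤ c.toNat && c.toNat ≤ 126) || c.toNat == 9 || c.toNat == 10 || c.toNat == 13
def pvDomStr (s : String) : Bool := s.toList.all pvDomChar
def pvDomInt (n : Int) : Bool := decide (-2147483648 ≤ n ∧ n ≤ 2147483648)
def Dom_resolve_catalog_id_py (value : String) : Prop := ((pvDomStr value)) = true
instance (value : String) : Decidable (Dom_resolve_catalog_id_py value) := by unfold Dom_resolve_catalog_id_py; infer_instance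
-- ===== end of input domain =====

-- B replaces A's three per-call scans of the catalog (re-normalizing every id/label/alias
-- on each call) by one precomputed flat dict from normalized string to catalog id;
-- same return value on every input.

-- shared helper _norm (defined identically in Source A and Source B)
def pvNorm (s : String) : String :=
  String.ofList (((PySem.Str.strip s).toList.filter
      (fun ch => PySem.Chars.isalnum ch || ch == ' ' || ch == '_' || ch == '-')).map
    PySem.Chars.lowerChar)

-- ===== PORT A =====
-- _INTEREST_CATALOG: each item as (id, label, aliases)
def pvCatalog : List (String × String × List String) :=
  [ ("exercise",   "Exercise",                ["workout", "run", "jog", "walk", "walking", "yoga", "stretch"]),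
    ("sleep",      "Sleep all day",           ["nap", "rest"]),
    ("eat",        "Eat",                     ["food", "dining", "meal", "cook", "cooking"]),
    ("meditate",   "Meditate",                ["mindfulness", "breathing", "breathwork"]),
    ("travel",     "Travel",                  ["trip", "vacation", "getaway"]),
    ("social",     "Spend time with friends", ["friends", "socialize", "hangout", "meet", "call"]),
    ("read",       "Read",                    ["reading", "books", "book"]),
    ("movies",     "Watch movies",            ["movie", "film", "tv", "netflix"]),
    ("create_art", "Create art",              ["draw", "painting", "paint", "sketch", "craft", "creative", "art"]) ]

def resolve_catalog_id_py (value : String) : Option String :=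
  if value == "" then none
  else
    let n := pvNorm value
    -- direct id match
    match pvCatalog.find? (fun item => n == pvNorm item.1) with
    | some item => some item.1
    | none =>
      -- label match
      match pvCatalog.find? (fun item => n == pvNorm item.2.1) with
      | some item => some item.1
      | none =>
        -- aliases match
        match pvCatalog.find? (fun item => item.2.2.any (fun a => n == pvNorm a)) with
        | some item => some item.1
        | none => none

-- ===== PORT B =====
-- Source B's literal _TABLE dict (all keys distinct)
def pvTable : PySem.Dict String String :=
  PySem.Dict.ofList
    [ ("exercise", "exercise"), ("sleep", "sleep"), ("eat", "eat"),
      ("meditate", "meditate"), ("travel", "travel"), ("social", "social"),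
      ("read", "read"), ("movies", "movies"), ("create_art", "create_art"),
      ("sleep all day", "sleep"), ("spend time with friends", "social"),
      ("watch movies", "movies"), ("create art", "create_art"),
      ("workout", "exercise"), ("run", "exercise"), ("jog", "exercise"),
      ("walk", "exercise"), ("walking", "exercise"), ("yoga", "exercise"),
      ("stretch", "exercise"), ("nap", "sleep"), ("rest", "sleep"),
      ("food", "eat"), ("dining", "eat"), ("meal", "eat"), ("cook", "eat"),
      ("cooking", "eat"), ("mindfulness", "meditate"), ("breathing", "meditate"),
      ("breathwork", "meditate"), ("trip", "travel"), ("vacation", "travel"),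
      ("getaway", "travel"), ("friends", "social"), ("socialize", "social"),
      ("hangout", "social"), ("meet", "social"), ("call", "social"),
      ("reading", "read"), ("books", "read"), ("book", "read"),
      ("movie", "movies"), ("film", "movies"), ("tv", "movies"),
      ("netflix", "movies"), ("draw", "create_art"), ("painting", "create_art"),
      ("paint", "create_art"), ("sketch", "create_art"), ("craft", "create_art"),
      ("creative", "create_art"), ("art", "create_art") ]

def resolve_catalog_id_py_alt (value : String) : Option String :=
  if value == "" then none
  else pvTable.get? (pvNorm value)

-- ===== PRECONDITION & SPEC =====
def Spec_resolve_catalog_id_py (value : String) (out : Option String) : Prop := out = resolve_catalog_id_py_alt value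
instance (value : String) (out : Option String) : Decidable (Spec_resolve_catalog_id_py value out) := by unfold Spec_resolve_catalog_id_py; infer_instance

-- ===== CLAIM (what is proved, stated in full; the proofs are below) =====
def Claim_equal_resolve_catalog_id_py : Prop := ∀ (value : String), Dom_resolve_catalog_id_py value → Spec_resolve_catalog_id_py value (resolve_catalog_id_py value)

-- ===== LEMMAS AND PROOFS =====

-- first-match lookup in an association list
def pvLook (ps : List (String × String)) (n : String) : Option String :=
  (ps.find? (fun p => p.1 == n)).map (·.2)

theorem pvLook_nil (n : String) : pvLook [] n = none := rfl

theorem pvLook_cons (k v : String) (ps : List (String × String)) (n : String) :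
    pvLook ((k, v) :: ps) n = if k == n then some v else pvLook ps n := by
  by_cases h : k = n
  · simp [pvLook, List.find?, h]
  · have hb : (k == n) = false := beq_eq_false_iff_ne.mpr h
    simp [pvLook, List.find?, hb]

theorem pvLook_append (xs ys : List (String × String)) (n : String) :
    pvLook (xs ++ ys) n = (pvLook xs n).orElse (fun _ => pvLook ys n) := by
  induction xs with
  | nil => simp [pvLook_nil, Option.orElse]
  | cons p xs ih =>
    rcases p with ⟨k, v⟩
    rw [List.cons_append, pvLook_cons, pvLook_cons]
    by_cases h : k == n <;> simp [h, ih, Option.orElse]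

-- A's id scan = lookup in the mapped id pairs
theorem pv_scan_fst (L : List (String × String × List String)) (n : String) :
    (L.find? (fun it => n == pvNorm it.1)).map (·.1)
      = pvLook (L.map (fun it => (pvNorm it.1, it.1))) n := by
  induction L with
  | nil => rfl
  | cons it L ih =>
    simp only [List.find?, List.map_cons]
    rw [pvLook_cons]
    by_cases h : n = pvNorm it.1
    · simp [h]
    · have h1 : (n == pvNorm it.1) = false := by simp [h]
      have h2 : (pvNorm it.1 == n) = false := by
        simp; exact fun e => h e.symm
      simp [h1, h2, ih]

-- A's label scan = lookup in the mapped label pairs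
theorem pv_scan_label (L : List (String × String × List String)) (n : String) :
    (L.find? (fun it => n == pvNorm it.2.1)).map (·.1)
      = pvLook (L.map (fun it => (pvNorm it.2.1, it.1))) n := by
  induction L with
  | nil => rfl
  | cons it L ih =>
    simp only [List.find?, List.map_cons]
    rw [pvLook_cons]
    by_cases h : n = pvNorm it.2.1
    · simp [h]
    · have h1 : (n == pvNorm it.2.1) = false := by simp [h]
      have h2 : (pvNorm it.2.1 == n) = false := by
        simp; exact fun e => h e.symm
      simp [h1, h2, ih]

-- alias pairs of one item, seen through pvLook
theorem pv_alias_block (as : List String) (x : String) (rest : List (String × String)) (n : String) :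
    pvLook (as.map (fun a => (pvNorm a, x)) ++ rest) n
      = if as.any (fun a => n == pvNorm a) then some x else pvLook rest n := by
  induction as with
  | nil => simp
  | cons a as ih =>
    simp only [List.map_cons, List.cons_append, List.any_cons]
    rw [pvLook_cons]
    by_cases h : n = pvNorm a
    · simp [h]
    · have h1 : (n == pvNorm a) = false := by simp [h]
      have h2 : (pvNorm a == n) = false := by
        simp; exact fun e => h e.symm
      simp [h1, h2, ih]

-- A's alias scan = lookup in the flatMapped alias pairs
theorem pv_scan_alias (L : List (String × String × List String)) (n : String) :
    (L.find? (fun it => it.2.2.any (fun a => n == pvNorm a))).map (·.1)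
      = pvLook (L.flatMap (fun it => it.2.2.map (fun a => (pvNorm a, it.1)))) n := by
  induction L with
  | nil => rfl
  | cons it L ih =>
    simp only [List.find?, List.flatMap_cons]
    rw [pv_alias_block]
    by_cases h : it.2.2.any (fun a => n == pvNorm a)
    · simp [h]
    · simp [h, ih]

-- A's three scans, concatenated as one pair list (id, then label, then alias pairs)
def pvPairsA : List (String × String) :=
  pvCatalog.map (fun it => (pvNorm it.1, it.1))
    ++ pvCatalog.map (fun it => (pvNorm it.2.1, it.1))
    ++ pvCatalog.flatMap (fun it => it.2.2.map (fun a => (pvNorm a, it.1)))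

-- B's literal dict, as the list Source B writes down
def pvTableList : List (String × String) :=
  [ ("exercise", "exercise"), ("sleep", "sleep"), ("eat", "eat"),
    ("meditate", "meditate"), ("travel", "travel"), ("social", "social"),
    ("read", "read"), ("movies", "movies"), ("create_art", "create_art"),
    ("sleep all day", "sleep"), ("spend time with friends", "social"),
    ("watch movies", "movies"), ("create art", "create_art"),
    ("workout", "exercise"), ("run", "exercise"), ("jog", "exercise"),
    ("walk", "exercise"), ("walking", "exercise"), ("yoga", "exercise"),
    ("stretch", "exercise"), ("nap", "sleep"), ("rest", "sleep"),
    ("food", "eat"), ("dining", "eat"), ("meal", "eat"), ("cook", "eat"),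
    ("cooking", "eat"), ("mindfulness", "meditate"), ("breathing", "meditate"),
    ("breathwork", "meditate"), ("trip", "travel"), ("vacation", "travel"),
    ("getaway", "travel"), ("friends", "social"), ("socialize", "social"),
    ("hangout", "social"), ("meet", "social"), ("call", "social"),
    ("reading", "read"), ("books", "read"), ("book", "read"),
    ("movie", "movies"), ("film", "movies"), ("tv", "movies"),
    ("netflix", "movies"), ("draw", "create_art"), ("painting", "create_art"),
    ("paint", "create_art"), ("sketch", "create_art"), ("craft", "create_art"),
    ("creative", "create_art"), ("art", "create_art") ]

-- the dict Source B builds is the literal association list (all keys distinct)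
set_option maxRecDepth 8192 in
theorem pvTable_eq_mk : pvTable = PySem.Dict.mk pvTableList := by decide

-- get? on a literal dict is first-match association lookup
theorem pvGet?_mk (l : List (String × String)) (n : String) :
    (PySem.Dict.mk l).get? n = pvLook l n := by
  induction l with
  | nil => rfl
  | cons p l ih =>
    rcases p with ⟨k, v⟩
    rw [PySem.Dict.get?_mk_cons, pvLook_cons, ih]

-- first-occurrence key dedup (keys in `seen` are dropped)
def pvDedup (seen : List String) : List (String × String) → List (String × String)
  | [] => []
  | (k, v) :: ps =>
    if seen.contains k then pvDedup seen ps
    else (k, v) :: pvDedup (k :: seen) ps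

-- first-match lookup ignores later duplicate keys
theorem pvLook_dedup (ps : List (String × String)) (seen : List String) (n : String)
    (hn : seen.contains n = false) : pvLook (pvDedup seen ps) n = pvLook ps n := by
  induction ps generalizing seen with
  | nil => rfl
  | cons p ps ih =>
    rcases p with ⟨k, v⟩
    rw [pvLook_cons]
    by_cases hk : seen.contains k
    · have hkn : (k == n) = false := by
        by_contra hc
        have : k = n := by simpa using (Bool.not_eq_false _).mp hc
        rw [this, hn] at hk; exact Bool.false_ne_true hk
      simp only [pvDedup, hk, if_true, hkn, if_false, Bool.false_eq_true]
      exact ih seen hn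
    · simp only [pvDedup, hk, if_false, Bool.false_eq_true]
      rw [pvLook_cons]
      by_cases hkn : (k == n) = true
      · simp [hkn]
      · have hkn' : (k == n) = false := by simpa using hkn
        simp only [hkn', if_false, Bool.false_eq_true]
        refine ih (k :: seen) ?_
        simp [Bool.beq_comm] at *
        simpa [hkn'] using hn

-- deduplicating A's pair list yields exactly B's literal table
set_option maxRecDepth 8192 in
theorem pvDedup_pairsA : pvDedup [] pvPairsA = pvTableList := by decide

theorem pvLook_pairsA_eq_table (n : String) : pvLook pvPairsA n = pvLook pvTableList n := by
  rw [← pvDedup_pairsA, pvLook_dedup _ _ _ (by rfl)]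

-- ===== VERDICT (by name: the statement is the Claim_ definition above) =====
theorem resolve_catalog_id_py_spec : Claim_equal_resolve_catalog_id_py := by
  intro value _
  unfold Spec_resolve_catalog_id_py resolve_catalog_id_py resolve_catalog_id_py_alt
  by_cases hv : value == ""
  · simp [hv]
  · simp only [hv, if_false, Bool.false_eq_true]
    set n := pvNorm value with hn
    rw [pvTable_eq_mk, pvGet?_mk, ← pvLook_pairsA_eq_table, pvPairsA]
    rw [pvLook_append, pvLook_append]
    rw [← pv_scan_fst, ← pv_scan_label, ← pv_scan_alias]
    cases h1 : pvCatalog.find? (fun item => n == pvNorm item.1) with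
    | some it => simp [Option.orElse]
    | none =>
      cases h2 : pvCatalog.find? (fun item => n == pvNorm item.2.1) with
      | some it => simp [Option.orElse]
      | none =>
        cases h3 : pvCatalog.find? (fun item => item.2.2.any (fun a => n == pvNorm a)) with
        | some it => simp [Option.orElse]
        | none => simp [Option.orElse]
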